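-- pv_equiv track=rewrite | github.com/ArTuR00232/Epicgames_scraping_games | epicgames.py | compare_queues
-- ===== SOURCE A (Python) =====
-- from collections import Counter
--
-- def compare_queues(x, y):
--     # Count the elements in the two queues
--     counter_x = Counter(x)
--     counter_y = Counter(y)
--
--     # Find elements that appear exactly once in y
--     unique_elements = []
--     for element, count in counter_y.items():
--          if count >= 1 and counter_x.get(element, 0) >=1:
--             unique_elements.append(element)
--
--     return unique_elements
-- ===== SOURCE B (Python) =====
-- def compare_queues(x, y):
--     # Worklist algorithm: repeatedly take the head of the remaining queue,
--     # emit it if it occurs in x, then strip ALL further copies of it from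
--     # the worklist before continuing.  No Counter and no seen-set needed.
--     result = []
--     pending = list(y)
--     while pending:
--         head = pending[0]
--         if head in x:
--             result.append(head)
--         pending = [z for z in pending[1:] if z != head]
--     return result
-- ===== Notes on version B (the rewrite author's own statement) =====
-- stated objective: alternative
-- what changed: Replaces the two Counter builds plus iteration over Counter(y).items() by a worklist algorithm: repeatedly pop the head of the remaining queue, emit it if it is in x, and strip all remaining copies of it from the worklist, so no counts and no seen-set are ever maintained.
import Mathlib
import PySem

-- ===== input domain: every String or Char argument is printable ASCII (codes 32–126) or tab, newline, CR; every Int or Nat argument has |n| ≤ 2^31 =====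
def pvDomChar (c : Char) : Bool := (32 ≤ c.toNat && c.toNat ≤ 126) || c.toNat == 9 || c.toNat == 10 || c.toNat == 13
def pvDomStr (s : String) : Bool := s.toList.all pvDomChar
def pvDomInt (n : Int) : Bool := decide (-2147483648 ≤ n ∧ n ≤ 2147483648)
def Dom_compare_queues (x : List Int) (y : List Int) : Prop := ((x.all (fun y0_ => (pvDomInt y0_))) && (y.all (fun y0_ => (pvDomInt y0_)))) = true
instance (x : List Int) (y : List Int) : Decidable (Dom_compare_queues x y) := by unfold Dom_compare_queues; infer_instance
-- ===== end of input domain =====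

-- B replaces the two Counter builds + iteration over Counter(y).items() by a worklist
-- algorithm (pop the head, emit it if in x, strip its remaining copies) — alternative
-- decomposition with no counts and no seen-set; no speed claim.


-- ===== PORT A =====
def compare_queues (x : List Int) (y : List Int) : List Int :=
  let counter_x := PySem.Dict.counter x
  let counter_y := PySem.Dict.counter y
  (PySem.Dict.items counter_y).foldl
    (fun unique_elements ec =>
      if ec.2 ≥ 1 ∧ PySem.Dict.getD counter_x ec.1 0 ≥ 1 then unique_elements ++ [ec.1]
      else unique_elements) []

-- ===== PORT B =====
-- the `while pending:` loop of Source B, state = (result, pending); terminates because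
-- `pending` strictly shrinks each iteration
def pvAltLoop (x : List Int) (result : List Int) (pending : List Int) : List Int :=
  match pending with
  | [] => result
  | head :: tl =>
      pvAltLoop x (if head ∈ x then result ++ [head] else result)
        (tl.filter (fun z => decide (z ≠ head)))
termination_by pending.length
decreasing_by
  simp only [List.length_cons, List.length_unattach]
  exact Nat.lt_succ_of_le (le_trans (List.length_filter_le _ _) (by simp))

def compare_queues_alt (x : List Int) (y : List Int) : List Int :=
  pvAltLoop x [] y

-- ===== PRECONDITION & SPEC =====
def Spec_compare_queues (x : List Int) (y : List Int) (out : List Int) : Prop := out = compare_queues_alt x y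
instance (x : List Int) (y : List Int) (out : List Int) : Decidable (Spec_compare_queues x y out) := by unfold Spec_compare_queues; infer_instance

-- ===== CLAIM (what is proved, stated in full; the proofs are below) =====
def Claim_equal_compare_queues : Prop := ∀ (x : List Int) (y : List Int), Dom_compare_queues x y → Spec_compare_queues x y (compare_queues x y)

-- ===== LEMMAS AND PROOFS =====

theorem pvAltLoop_nil (x res : List Int) : pvAltLoop x res [] = res := by
  rw [pvAltLoop]

theorem pvAltLoop_cons (x res : List Int) (head : Int) (tl : List Int) :
    pvAltLoop x res (head :: tl)
      = pvAltLoop x (if head ∈ x then res ++ [head] else res)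
          (tl.filter (fun z => decide (z ≠ head))) := by
  rw [pvAltLoop]

/-- Common recursive description both ports are reduced to: the elements of `y`
(in order of first appearance, skipping `seen`) that are in `x`. -/
def pvKeep (x : List Int) : List Int → List Int → List Int
  | _, [] => []
  | seen, e :: rest =>
      if e ∈ x ∧ e ∉ seen then e :: pvKeep x (seen ++ [e]) rest else pvKeep x seen rest

theorem pvKeep_foldl_add (x : List Int) (y : List Int) : ∀ (s : List Int),
    (y.foldl PySem.Set.add s).filter (fun k => decide (k ∈ x))
      = s.filter (fun k => decide (k ∈ x)) ++ pvKeep x (s.filter (fun k => decide (k ∈ x))) y := by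
  induction y with
  | nil => intro s; simp [pvKeep]
  | cons e rest ih =>
    intro s
    by_cases hs : e ∈ s
    · have : PySem.Set.add s e = s := PySem.Set.add_of_mem hs
      simp only [List.foldl_cons, this, ih s, pvKeep]
      by_cases hx : e ∈ x
      · have : e ∈ s.filter (fun k => decide (k ∈ x)) := by
          simp [List.mem_filter, hs, hx]
        simp [hx, this]
      · simp [hx]
    · have hadd : PySem.Set.add s e = s ++ [e] := PySem.Set.add_of_not_mem hs
      have hns : e ∉ s.filter (fun k => decide (k ∈ x)) := by
        intro h; exact hs (List.mem_of_mem_filter h)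
      simp only [List.foldl_cons, hadd, ih (s ++ [e]), pvKeep]
      by_cases hx : e ∈ x
      · simp [List.filter_append, hx, hns, List.append_assoc]
      · simp [List.filter_append, hx, hns]

theorem compare_queues_eq_pvKeep (x y : List Int) :
    compare_queues x y = pvKeep x [] y := by
  simp only [compare_queues]
  rw [PySem.Dict.items_counter, List.foldl_map,
      show (fun (unique_elements : List Int) (k : Int) =>
          if ((k, (y.count k : Int)).2 ≥ 1 ∧
              PySem.Dict.getD (PySem.Dict.counter x) (k, (y.count k : Int)).1 0 ≥ 1) then
            unique_elements ++ [(k, (y.count k : Int)).1]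
          else unique_elements)
        = (fun unique_elements k =>
          if ((y.count k : Int) ≥ 1 ∧ (x.count k : Int) ≥ 1) then unique_elements ++ [k]
          else unique_elements) from by
        funext acc k; simp [PySem.Dict.getD_counter],
      PySem.List.foldl_append_ite_eq_filter]
  have hfc : (PySem.Set.ofList y).filter
        (fun k => decide ((y.count k : Int) ≥ 1 ∧ (x.count k : Int) ≥ 1))
      = (PySem.Set.ofList y).filter (fun k => decide (k ∈ x)) := by
    apply List.filter_congr
    intro k hk
    have hky : k ∈ y := (PySem.Set.mem_ofList y k).mp hk
    have hcy : 1 ≤ y.count k := List.one_le_count_iff.mpr hky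
    simp only [decide_eq_decide]
    constructor
    · intro h
      have := h.2
      have : 1 ≤ x.count k := by exact_mod_cast this
      exact List.one_le_count_iff.mp this
    · intro h
      refine ⟨by exact_mod_cast hcy, ?_⟩
      have : 1 ≤ x.count k := List.one_le_count_iff.mpr h
      exact_mod_cast this
  rw [hfc, show PySem.Set.ofList y = y.foldl PySem.Set.add [] from rfl,
      pvKeep_foldl_add x y []]
  simp

/-- `pvKeep` only looks at `seen` through its members that are in `x`. -/
theorem pvKeep_congr (x : List Int) : ∀ (y seen seen' : List Int),
    (∀ z, z ∈ x → (z ∈ seen ↔ z ∈ seen')) → pvKeep x seen y = pvKeep x seen' y := by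
  intro y
  induction y with
  | nil => intro seen seen' _; simp [pvKeep]
  | cons e rest ih =>
    intro seen seen' h
    simp only [pvKeep]
    by_cases hx : e ∈ x
    · by_cases hs : e ∈ seen
      · have hs' : e ∈ seen' := (h e hx).mp hs
        rw [if_neg (by tauto), if_neg (by tauto)]
        exact ih seen seen' h
      · have hs' : e ∉ seen' := fun hc => hs ((h e hx).mpr hc)
        rw [if_pos ⟨hx, hs⟩, if_pos ⟨hx, hs'⟩]
        refine congrArg _ (ih _ _ ?_)
        intro z hz; simp [h z hz]
    · rw [if_neg (by tauto), if_neg (by tauto)]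
      exact ih seen seen' h

/-- The worklist loop computes `pvKeep`: filtering the pending queue by
`∉ seen` corresponds to running `pvKeep` with that `seen`. -/
theorem pvAltLoop_eq_pvKeep (x : List Int) : ∀ (n : ℕ) (y seen res : List Int),
    y.length ≤ n →
    pvAltLoop x res (y.filter (fun z => !decide (z ∈ seen))) = res ++ pvKeep x seen y := by
  intro n
  induction n with
  | zero =>
    intro y seen res hy
    have : y = [] := List.eq_nil_of_length_eq_zero (Nat.le_zero.mp hy)
    subst this; simp [pvAltLoop_nil, pvKeep]
  | succ n ih =>
    intro y seen res hy
    match y with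
    | [] => simp [pvAltLoop_nil, pvKeep]
    | e :: rest =>
      have hr : rest.length ≤ n := Nat.le_of_succ_le_succ hy
      by_cases hs : e ∈ seen
      · have hcons : (e :: rest).filter (fun z => !decide (z ∈ seen))
            = rest.filter (fun z => !decide (z ∈ seen)) := by simp [hs]
        rw [hcons, ih rest seen res hr]
        simp [pvKeep, hs]
      · have hfe : (rest.filter (fun z => !decide (z ∈ seen))).filter
            (fun z => decide (z ≠ e)) = rest.filter (fun z => !decide (z ∈ seen ++ [e])) := by
          rw [List.filter_filter]
          apply List.filter_congr
          intro z _
          by_cases hze : z = e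
          · subst hze; simp
          · simp [hze]
        have hcons : (e :: rest).filter (fun z => !decide (z ∈ seen))
            = e :: rest.filter (fun z => !decide (z ∈ seen)) := by simp [hs]
        rw [hcons, pvAltLoop_cons, hfe]
        by_cases hx : e ∈ x
        · rw [if_pos hx, ih rest (seen ++ [e]) (res ++ [e]) hr]
          simp [pvKeep, hx, hs]
        · rw [if_neg hx, ih rest (seen ++ [e]) res hr]
          have : pvKeep x (seen ++ [e]) rest = pvKeep x seen rest := by
            apply pvKeep_congr
            intro z hz
            have : z ≠ e := fun hc => hx (hc ▸ hz)
            simp [this]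
          rw [this]
          simp [pvKeep, hx, hs]

theorem compare_queues_alt_eq_pvKeep (x y : List Int) :
    compare_queues_alt x y = pvKeep x [] y := by
  unfold compare_queues_alt
  have h := pvAltLoop_eq_pvKeep x y.length y [] [] le_rfl
  simpa using h

-- ===== VERDICT (by name: the statement is the Claim_ definition above) =====
theorem compare_queues_spec : Claim_equal_compare_queues := by
  intro x y _
  unfold Spec_compare_queues
  rw [compare_queues_eq_pvKeep, compare_queues_alt_eq_pvKeep]
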